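-- pv_equiv track=rewrite | github.com/joshanashakya/dissertation | workspace/dataset/java-python/GeeksForGeeks/2280/A/2.py | conell
-- ===== SOURCE A (Python) =====
-- def gen(n, r):
--     a = r[-1]
--     a += 1
--     for i in range(1, n + 1):
--         r.append(a)
--         a += 2
--     return r
--
-- def conell(n):
--     res = []
--     k = 1
--
--     # A dummy 0 is inserted at the
--     # beginning for consistency
--     res.append(0)
--
--     while 1:
--
--         # Calling function gen() to generate
--         # 'k' number of terms
--         res = gen(k, res)
--         k += 1
--         j = len(res) - 1
--         while j != n and j + k > n:
--             k -= 1
--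
--         # Checking if 'n' terms are
--         # already generated
--         if j >= n:
--             break
--
--     # Removing the previously inserted dummy 0
--     res.remove(res[0])
--     return res
-- ===== SOURCE B (Python) =====
-- def conell(n):
--     # Single linear pass: walk the Connell sequence one term at a time,
--     # bumping by one at triangular-number boundaries and by two inside a group.
--     res = [1]
--     val = 1
--     i = 1        # number of terms produced so far
--     tri = 1      # next triangular boundary
--     step = 2
--     while len(res) < n:
--         if i == tri:
--             val += 1
--             tri += step
--             step += 1
--         else:
--             val += 2
--         res.append(val)
--         i += 1
--     return res
-- ===== Notes on version B (the rewrite author's own statement) =====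
-- stated objective: simpler
-- what changed: Replaces A's dummy-0 group-builder (gen appending whole groups, k re-truncated by an inner while, final remove of the dummy) with a single linear pass that emits one term per iteration, bumping the value by one at triangular boundaries and by two otherwise.
import Mathlib
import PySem

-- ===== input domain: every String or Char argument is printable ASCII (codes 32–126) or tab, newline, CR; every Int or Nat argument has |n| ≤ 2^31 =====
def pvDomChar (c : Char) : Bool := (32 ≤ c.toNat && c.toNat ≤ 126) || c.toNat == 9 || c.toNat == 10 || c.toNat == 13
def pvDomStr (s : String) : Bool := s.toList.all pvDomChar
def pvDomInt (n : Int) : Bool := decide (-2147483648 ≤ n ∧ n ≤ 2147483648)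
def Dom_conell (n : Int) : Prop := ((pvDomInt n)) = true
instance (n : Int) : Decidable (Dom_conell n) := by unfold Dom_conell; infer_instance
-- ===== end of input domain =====

-- B replaces A's dummy-0 group-builder with a single per-term linear pass (simpler decomposition, same O(n) cost).

-- ===== PORT A =====
-- the for-loop of gen: append a, then a += 2, n times
def genSeg : Nat → Int → List Int
  | 0, _ => []
  | c + 1, a => a :: genSeg c (a + 2)

-- cited by conellAux's termination proof
theorem genSeg_length (c : Nat) : ∀ a, (genSeg c a).length = c := by
  induction c with
  | zero => simp [genSeg]
  | succ c ih => intro a; simp [genSeg, ih]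

def gen (n : Int) (r : List Int) : List Int :=
  let a := (PySem.List.pyGet? r (-1)).getD 0 + 1
  r ++ genSeg n.toNat a

-- inner `while j != n and j + k > n: k -= 1`
def innerW (n j k : Int) : Int :=
  if j ≠ n ∧ j + k > n then innerW n j (k - 1) else k
termination_by (j + k - n).toNat
decreasing_by omega

-- outer `while 1` loop (gen, then k += 1, then the inner while, then the break test);
-- the `k < 1` branch is a totality guard only (unreachable: k ≥ 1 at every call)
def conellAux (n : Int) (res : List Int) (k : Int) : List Int :=
  if k < 1 then res
  else if ((gen k res).length : Int) - 1 ≥ n then gen k res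
  else conellAux n (gen k res) (innerW n (((gen k res).length : Int) - 1) (k + 1))
termination_by (n + 1 - (res.length : Int)).toNat
decreasing_by
  simp only [gen, List.length_append, genSeg_length] at *
  omega

def conell (n : Int) : List Int :=
  let res := conellAux n [0] 1
  (PySem.List.remove? res ((PySem.List.pyGet? res 0).getD 0)).getD []

-- ===== PORT B =====
-- `while len(res) < n` runs (n - 1).toNat times: len starts at 1 and grows by 1 each iteration
def altAux : Nat → List Int → Int → Int → Int → Int → List Int
  | 0, res, _, _, _, _ => res
  | c + 1, res, val, i, tri, step =>
    if i = tri then altAux c (res ++ [val + 1]) (val + 1) (i + 1) (tri + step) (step + 1)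
    else altAux c (res ++ [val + 2]) (val + 2) (i + 1) tri step

def conell_alt (n : Int) : List Int :=
  altAux (n - 1).toNat [1] 1 1 1 2

-- ===== PRECONDITION & SPEC =====
def Spec_conell (n : Int) (out : List Int) : Prop := out = conell_alt n
instance (n : Int) (out : List Int) : Decidable (Spec_conell n out) := by unfold Spec_conell; infer_instance

-- ===== CLAIM (what is proved, stated in full; the proofs are below) =====
def Claim_equal_conell : Prop := ∀ (n : Int), Dom_conell n → Spec_conell n (conell n)

-- ===== LEMMAS AND PROOFS =====

-- B's loop body without the accumulator
def refAux : Nat → Int → Int → Int → Int → List Int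
  | 0, _, _, _, _ => []
  | c + 1, val, i, tri, step =>
    if i = tri then (val + 1) :: refAux c (val + 1) (i + 1) (tri + step) (step + 1)
    else (val + 2) :: refAux c (val + 2) (i + 1) tri step

theorem altAux_eq (c : Nat) : ∀ (res : List Int) (val i tri step : Int),
    altAux c res val i tri step = res ++ refAux c val i tri step := by
  induction c with
  | zero => simp [altAux, refAux]
  | succ c ih =>
    intro res val i tri step
    simp only [altAux, refAux]
    split_ifs <;> simp [ih]

theorem genSeg_getLast? (c : Nat) : ∀ a : Int, (genSeg (c + 1) a).getLast? = some (a + 2 * c) := by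
  induction c with
  | zero => intro a; simp [genSeg]
  | succ c ih =>
    intro a
    show (a :: genSeg (c + 1) (a + 2)).getLast? = _
    rw [List.getLast?_cons, ih]
    simp; ring

-- interior run: no boundary hit in the next c steps
theorem refAux_pref (c : Nat) : ∀ (val i tri step : Int), i + c ≤ tri →
    refAux c val i tri step = genSeg c (val + 2) := by
  induction c with
  | zero => simp [refAux, genSeg]
  | succ c ih =>
    intro val i tri step h
    have hi : i ≠ tri := by push_cast at h; omega
    simp only [refAux, if_neg hi]
    rw [ih (val + 2) (i + 1) tri step (by push_cast at h ⊢; omega)]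
    simp [genSeg]

-- interior run with continuation: c steps reaching the boundary exactly, then b more
theorem refAux_cont (c : Nat) : ∀ (val i tri step : Int) (b : Nat), i + c = tri →
    refAux (c + b) val i tri step
      = genSeg c (val + 2) ++ refAux b (val + 2 * c) tri tri step := by
  induction c with
  | zero =>
    intro val i tri step b h
    have hit : i = tri := by push_cast at h; omega
    subst hit
    simp [genSeg]
  | succ c ih =>
    intro val i tri step b h
    have hi : i ≠ tri := by push_cast at h; omega
    have h2 : c + 1 + b = (c + b) + 1 := by omega
    rw [h2]
    simp only [refAux, if_neg hi]
    rw [ih (val + 2) (i + 1) tri step b (by push_cast at h ⊢; omega)]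
    have hv : val + 2 + 2 * (c : Int) = val + 2 * ((c : Nat) + 1 : Nat) := by push_cast; ring
    rw [hv]
    simp [genSeg]

-- a run of k ≤ s terms starting at a boundary state
theorem refAux_trunc (k : Nat) (val t s : Int) (h1 : 1 ≤ k) (hks : (k : Int) ≤ s) :
    refAux k val t t s = genSeg k (val + 1) := by
  cases k with
  | zero => omega
  | succ m =>
    simp only [refAux, if_true]
    rw [refAux_pref m (val + 1) (t + 1) (t + s) (s + 1) (by push_cast at hks ⊢; omega)]
    simp [genSeg]

-- a full group of s terms from a boundary state lands on the next boundary state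
theorem refAux_group (b : Nat) (val t s : Int) (hs : 1 ≤ s) :
    refAux (s.toNat + b) val t t s
      = genSeg s.toNat (val + 1) ++ refAux b (val + 2 * s - 1) (t + s) (t + s) (s + 1) := by
  obtain ⟨m, hm⟩ : ∃ m, s.toNat = m + 1 := ⟨s.toNat - 1, by omega⟩
  rw [hm]
  have h2 : m + 1 + b = (m + b) + 1 := by omega
  rw [h2]
  simp only [refAux, if_true]
  rw [refAux_cont m (val + 1) (t + 1) (t + s) (s + 1) b (by
    have : ((m : Nat) : Int) = s - 1 := by omega
    rw [this]; ring)]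
  have hv : val + 1 + 2 * (m : Int) = val + 2 * s - 1 := by omega
  rw [hv]
  simp [genSeg]

theorem innerW_eq (n j K : Int) (hj : j < n) :
    innerW n j K = if K ≤ n - j then K else n - j := by
  by_cases h : K ≤ n - j
  · rw [innerW, if_neg (by omega), if_pos h]
  · rw [if_neg h]
    have main : ∀ (d : Nat) (K : Int), (K - (n - j)).toNat = d → n - j ≤ K →
        innerW n j K = n - j := by
      intro d
      induction d with
      | zero => intro K h1 h2; rw [innerW, if_neg (by omega)]; omega
      | succ d ihd =>
        intro K h1 h2
        rw [innerW, if_pos (by constructor <;> omega)]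
        exact ihd (K - 1) (by omega) (by omega)
    exact main (K - (n - j)).toNat K rfl (by omega)

theorem pv_main (n : Int) (c : Nat) : ∀ (pre : List Int) (val t k s : Int),
    (n - t).toNat = c →
    pre.getLast? = some val →
    (pre.length : Int) = t + 1 →
    t < n → 1 ≤ k → k ≤ s → t + k ≤ n → (k < s → t + k = n) →
    conellAux n pre k = pre ++ refAux (n - t).toNat val t t s := by
  induction c using Nat.strong_induction_on with
  | _ c ih =>
  intro pre val t k s hc hlast hlen ht hk hks hkn htr
  have hpre : pre ≠ [] := by intro h; simp [h] at hlast
  have hget : (PySem.List.pyGet? pre (-1)).getD 0 = val := by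
    rw [PySem.List.pyGet?_neg_one, hlast]; rfl
  have hkN : ((k.toNat : Nat) : Int) = k := Int.toNat_of_nonneg (by omega)
  have hgen : gen k pre = pre ++ genSeg k.toNat (val + 1) := by
    simp only [gen, hget]
  have hlen' : (((pre ++ genSeg k.toNat (val + 1)).length : Nat) : Int) = t + 1 + k := by
    simp [genSeg_length]; omega
  rw [conellAux, if_neg (by omega), hgen, hlen']
  by_cases hend : t + k = n
  · rw [if_pos (by omega)]
    have hnt : (n - t).toNat = k.toNat := by omega
    rw [hnt, refAux_trunc k.toNat val t s (by omega) (by omega)]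
  · rw [if_neg (by omega)]
    have hksEq : k = s := by
      rcases lt_or_eq_of_le hks with h | h
      · exact absurd (htr h) hend
      · exact h
    subst hksEq
    set K2 := innerW n (t + 1 + k - 1) (k + 1) with hK2
    have hK2v : K2 = if k + 1 ≤ n - (t + 1 + k - 1) then k + 1 else n - (t + 1 + k - 1) :=
      innerW_eq n (t + 1 + k - 1) (k + 1) (by omega)
    have hK2b : 1 ≤ K2 ∧ K2 ≤ k + 1 ∧ (t + k) + K2 ≤ n ∧ (K2 < k + 1 → (t + k) + K2 = n) := by
      rw [hK2v]; split_ifs <;> exact ⟨by omega, by omega, by omega, by omega⟩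
    obtain ⟨hb1, hb2, hb3, hb4⟩ := hK2b
    have hklast : (pre ++ genSeg k.toNat (val + 1)).getLast? = some (val + 2 * k - 1) := by
      obtain ⟨m, hm⟩ : ∃ m, k.toNat = m + 1 := ⟨k.toNat - 1, by omega⟩
      rw [List.getLast?_append_of_ne_nil, hm, genSeg_getLast?]
      · congr 1
        have : ((m : Nat) : Int) = k - 1 := by omega
        rw [this]; ring
      · rw [hm]; simp [genSeg]
    have hmeas : (n - (t + k)).toNat < c := by omega
    rw [ih _ hmeas (pre ++ genSeg k.toNat (val + 1)) (val + 2 * k - 1) (t + k) K2 (k + 1)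
      rfl hklast (by rw [hlen']; ring) (by omega) hb1 hb2 hb3 hb4]
    have hsplit : (n - t).toNat = k.toNat + (n - (t + k)).toNat := by omega
    rw [hsplit, refAux_group ((n - (t + k)).toNat) val t k (by omega)]
    simp [List.append_assoc]

theorem pv_final (n : Int) : conell n = conell_alt n := by
  by_cases hn : n ≤ 0
  · have hg : gen 1 [0] = [0, 1] := by decide
    have h1 : conellAux n [0] 1 = [0, 1] := by
      rw [conellAux, if_neg (by omega), hg, if_pos (by simp; omega)]
    have h2 : (n - 1).toNat = 0 := by omega
    unfold conell conell_alt
    rw [h1, h2]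
    decide
  · have hn1 : 1 ≤ n := by omega
    have h0 : conellAux n [0] 1 = [0] ++ refAux (n - 0).toNat 0 0 0 1 :=
      pv_main n (n - 0).toNat [0] 0 0 1 1 rfl (by simp) (by simp) (by omega) (by omega)
        (by omega) (by omega) (by omega)
    have hsplit : (n - 0).toNat = (1 : Int).toNat + (n - 1).toNat := by omega
    rw [hsplit, refAux_group ((n - 1).toNat) 0 0 1 (by omega)] at h0
    norm_num [genSeg] at h0
    unfold conell conell_alt
    rw [h0, altAux_eq]
    simp [PySem.List.pyGet?_zero_cons]

-- ===== VERDICT (by name: the statement is the Claim_ definition above) =====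
theorem conell_spec : Claim_equal_conell := by
  intro n _
  unfold Spec_conell
  exact pv_final n
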